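-- pv_equiv track=rewrite | github.com/ykssarv/Python_course | TK/tk1/exam.py | max_duplicate
-- ===== SOURCE A (Python) =====
-- def max_duplicate(nums):
--     """
--     Return the largest element which has at least one duplicate.
--
--     If no element has duplicate element (an element with the same value), return None.
--
--     max_duplicate([1, 2, 3]) => None
--     max_duplicate([1, 2, 2]) => 2
--     max_duplicate([1, 2, 2, 1, 1]) => 2
--
--     :param nums: List of integers
--     :return: Maximum element with duplicate. None if no duplicate found.
--     """
--     max = 0
--     for num in nums:
--         if nums.count(num) >= 2:
--             if num > max:
--                 max = num
--     if max == 0: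
--         return None
--     else:
--         return max
-- ===== SOURCE B (Python) =====
-- def max_duplicate(nums):
--     """Largest positive value appearing at least twice, else None.
--
--     Sort descending (without mutating nums) and return the first adjacent
--     equal positive pair: the first such hit in descending order is the
--     largest positive duplicate.
--     """
--     s = sorted(nums, reverse=True)
--     for i in range(1, len(s)):
--         if s[i] == s[i - 1] and s[i] > 0:
--             return s[i]
--     return None
-- ===== Notes on version B (the rewrite author's own statement) =====
-- stated objective: faster
-- what changed: Replaced A's per-element nums.count scans (quadratic) by sort-descending followed by a single adjacent-pair scan that returns at the first equal positive pair, with no 0-sentinel.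
import Mathlib
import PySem

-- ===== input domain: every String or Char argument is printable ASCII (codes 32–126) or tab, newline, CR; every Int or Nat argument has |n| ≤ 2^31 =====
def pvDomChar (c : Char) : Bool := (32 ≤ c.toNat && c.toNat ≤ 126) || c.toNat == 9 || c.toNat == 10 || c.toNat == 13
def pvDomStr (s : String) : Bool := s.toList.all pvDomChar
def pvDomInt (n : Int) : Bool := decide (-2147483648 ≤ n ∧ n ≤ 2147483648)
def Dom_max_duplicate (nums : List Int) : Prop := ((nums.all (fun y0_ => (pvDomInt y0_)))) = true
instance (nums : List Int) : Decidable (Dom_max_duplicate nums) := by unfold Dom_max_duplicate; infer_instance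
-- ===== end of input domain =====

-- B replaces A's quadratic repeated `nums.count` scans by sort-descending + one adjacent-pair scan (objective: faster, measured; O(n log n) vs O(n^2)).

-- ===== PORT A =====
-- literal port of A: running `max` seeded with 0, updated when nums.count(num) >= 2 and num > max
def max_duplicate (nums : List Int) : Option Int :=
  let m := nums.foldl (fun mx num =>
    if 2 ≤ PySem.List.count nums num then
      if mx < num then num else mx
    else mx) 0
  if m = 0 then none else some m

-- ===== PORT B =====
-- B's adjacent-pair scan over the descending-sorted list: return the first s[i] with s[i] = s[i-1] and s[i] > 0
def pvScanAdj : List Int → Option Int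
  | a :: b :: rest => if b = a ∧ 0 < b then some b else pvScanAdj (b :: rest)
  | _ => none

-- literal port of B: s = sorted(nums, reverse=True), then the adjacent scan
def max_duplicate_alt (nums : List Int) : Option Int :=
  pvScanAdj (PySem.List.sorted nums (fun x => x) true)

-- ===== PRECONDITION & SPEC =====
def Spec_max_duplicate (nums : List Int) (out : Option Int) : Prop := out = max_duplicate_alt nums
instance (nums : List Int) (out : Option Int) : Decidable (Spec_max_duplicate nums out) := by unfold Spec_max_duplicate; infer_instance

-- ===== CLAIM =====
def Claim_equal_max_duplicate : Prop := ∀ (nums : List Int), Dom_max_duplicate nums → Spec_max_duplicate nums (max_duplicate nums)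

-- ===== LEMMAS AND PROOFS =====

-- the common value both programs compute: max (with 0) of the elements occurring at least twice
def pvDupMax (l : List Int) : Int :=
  (l.filter (fun x => decide (2 ≤ List.count x l))).foldl max 0

-- encode A's `max == 0 → None` convention
def pvEnc (m : Int) : Option Int := if m = 0 then none else some m

lemma pvDupMax_nonneg (l : List Int) : 0 ≤ pvDupMax l :=
  (PySem.List.le_foldl_max _ 0).1

-- foldl max only depends on which elements occur
lemma foldl_max_mem_congr (L₁ L₂ : List Int) (a : Int)
    (h : ∀ x, x ∈ L₁ ↔ x ∈ L₂) : L₁.foldl max a = L₂.foldl max a := by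
  apply le_antisymm
  · rcases PySem.List.foldl_max_mem L₁ a with h1 | h1
    · rw [h1]; exact (PySem.List.le_foldl_max L₂ a).1
    · exact (PySem.List.le_foldl_max L₂ a).2 _ ((h _).1 h1)
  · rcases PySem.List.foldl_max_mem L₂ a with h1 | h1
    · rw [h1]; exact (PySem.List.le_foldl_max L₁ a).1
    · exact (PySem.List.le_foldl_max L₁ a).2 _ ((h _).2 h1)

-- membership in the duplicate filter
lemma mem_dupFilter (l : List Int) (x : Int) :
    x ∈ l.filter (fun x => decide (2 ≤ List.count x l)) ↔ x ∈ l ∧ 2 ≤ List.count x l := by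
  simp [List.mem_filter]

-- pvDupMax is invariant under permutation
lemma pvDupMax_perm {l₁ l₂ : List Int} (h : l₁.Perm l₂) : pvDupMax l₁ = pvDupMax l₂ := by
  unfold pvDupMax
  apply foldl_max_mem_congr
  intro x
  rw [mem_dupFilter, mem_dupFilter, h.mem_iff, h.count_eq]

-- A's loop is the running maximum over the elements with a duplicate
lemma foldA (nums : List Int) : ∀ (l : List Int) (a : Int),
    l.foldl (fun mx num =>
      if 2 ≤ PySem.List.count nums num then
        if mx < num then num else mx
      else mx) a
    = (l.filter (fun x => decide (2 ≤ List.count x nums))).foldl max a := by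
  intro l
  induction l with
  | nil => intro a; rfl
  | cons x l ih =>
    intro a
    rw [List.foldl_cons, ih, List.filter_cons]
    by_cases hx : 2 ≤ List.count x nums
    · have h1 : (if 2 ≤ PySem.List.count nums x then (if a < x then x else a) else a) = max a x := by
        rw [if_pos (by rwa [PySem.List.count_eq])]
        by_cases hh : a < x
        · rw [if_pos hh, max_eq_right hh.le]
        · rw [if_neg hh, max_eq_left (by omega)]
      rw [h1, if_pos (by simpa using hx), List.foldl_cons]
    · rw [if_neg (by rwa [PySem.List.count_eq]), if_neg (by simpa using hx)]

lemma A_eq (nums : List Int) : max_duplicate nums = pvEnc (pvDupMax nums) := by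
  unfold max_duplicate pvEnc pvDupMax
  rw [foldA nums nums 0]

-- if every element is ≤ 0 the duplicate maximum is the seed 0
lemma pvDupMax_nonpos {l : List Int} (h : ∀ x ∈ l, x ≤ 0) : pvDupMax l = 0 := by
  have h0 := pvDupMax_nonneg l
  rcases PySem.List.foldl_max_mem (l.filter (fun x => decide (2 ≤ List.count x l))) 0 with h1 | h1
  · exact h1
  · have := h _ ((mem_dupFilter l _).1 h1).1
    unfold pvDupMax at *
    omega

-- if every element is ≤ 0 the adjacent scan finds nothing
lemma pvScanAdj_nonpos : ∀ (l : List Int), (∀ x ∈ l, x ≤ 0) → pvScanAdj l = none := by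
  intro l
  induction l with
  | nil => intro _; rfl
  | cons a t ih =>
    intro h
    match t with
    | [] => rfl
    | b :: rest =>
      have hb : b ≤ 0 := h b (by simp)
      show (if b = a ∧ 0 < b then some b else pvScanAdj (b :: rest)) = none
      rw [if_neg (by omega)]
      exact ih (fun x hx => h x (List.mem_cons_of_mem a hx))

-- dropping a head that occurs nowhere else keeps pvDupMax
lemma pvDupMax_cons_not_mem {a : Int} {t : List Int} (h : a ∉ t) :
    pvDupMax (a :: t) = pvDupMax t := by
  unfold pvDupMax
  apply foldl_max_mem_congr
  intro x
  rw [mem_dupFilter, mem_dupFilter]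
  by_cases hx : x = a
  · subst hx
    have hc : List.count x t = 0 := List.count_eq_zero.2 h
    constructor
    · rintro ⟨-, hcnt⟩
      rw [List.count_cons_self, hc] at hcnt
      omega
    · rintro ⟨hm, -⟩; exact absurd hm h
  · have hc : List.count x (a :: t) = List.count x t := by
      simp [Ne.symm hx]
    rw [hc]
    simp [List.mem_cons, hx]

-- a doubled positive head dominating the list is the duplicate maximum
lemma pvDupMax_doubled_head {a : Int} {rest : List Int}
    (hpos : 0 < a) (hle : ∀ x ∈ a :: a :: rest, x ≤ a) :
    pvDupMax (a :: a :: rest) = a := by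
  have hmem : a ∈ (a :: a :: rest).filter (fun x => decide (2 ≤ List.count x (a :: a :: rest))) := by
    apply (mem_dupFilter _ _).2
    refine ⟨by simp, ?_⟩
    rw [List.count_cons_self, List.count_cons_self]
    omega
  have hge : a ≤ pvDupMax (a :: a :: rest) :=
    (PySem.List.le_foldl_max _ 0).2 _ hmem
  have hub : pvDupMax (a :: a :: rest) ≤ a := by
    rcases PySem.List.foldl_max_mem ((a :: a :: rest).filter (fun x => decide (2 ≤ List.count x (a :: a :: rest)))) 0 with h1 | h1
    · unfold pvDupMax; omega
    · exact hle _ ((mem_dupFilter _ _).1 h1).1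
  omega

-- the key lemma: on a descending list the adjacent scan computes pvEnc ∘ pvDupMax
lemma scan_eq : ∀ (s : List Int), s.Pairwise (fun a b => b ≤ a) →
    pvScanAdj s = pvEnc (pvDupMax s) := by
  intro s
  induction s with
  | nil =>
    intro _
    have : pvDupMax ([] : List Int) = 0 := rfl
    simp [pvScanAdj, this, pvEnc]
  | cons a t ih =>
    intro hp
    have hp' := (List.pairwise_cons.1 hp).2
    have hub : ∀ x ∈ t, x ≤ a := (List.pairwise_cons.1 hp).1
    match t with
    | [] =>
      have : pvDupMax [a] = 0 := by
        apply pvDupMax_cons_not_mem (by simp)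
      simp [pvScanAdj, this, pvEnc]
    | b :: rest =>
      show (if b = a ∧ 0 < b then some b else pvScanAdj (b :: rest)) = _
      by_cases hcond : b = a ∧ 0 < b
      · obtain ⟨rfl, hbpos⟩ := hcond
        rw [if_pos ⟨rfl, hbpos⟩]
        have hM : pvDupMax (b :: b :: rest) = b := by
          apply pvDupMax_doubled_head hbpos
          intro x hx
          rcases List.mem_cons.1 hx with rfl | hx'
          · exact le_refl _
          · exact hub x hx'
        rw [hM]
        unfold pvEnc
        rw [if_neg (by omega)]
      · rw [if_neg hcond]
        by_cases hba : b = a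
        · -- then ¬ 0 < b, i.e. b ≤ 0, and a = b so everything ≤ 0
          subst hba
          have hb0 : b ≤ 0 := by
            by_contra h
            exact hcond ⟨rfl, by omega⟩
          have hall : ∀ x ∈ b :: b :: rest, x ≤ 0 := by
            intro x hx
            rcases List.mem_cons.1 hx with rfl | hx'
            · exact hb0
            · exact le_trans (hub x hx') hb0
          rw [pvScanAdj_nonpos (b :: rest) (fun x hx => hall x (List.mem_cons_of_mem b hx)),
              pvDupMax_nonpos hall]
          simp [pvEnc]
        · -- a > b ≥ every element of rest, so a occurs once
          have hblt : b < a := lt_of_le_of_ne (hub b (by simp)) hba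
          have hnm : a ∉ b :: rest := by
            intro hmem
            rcases List.mem_cons.1 hmem with rfl | hmem'
            · omega
            · have := (List.pairwise_cons.1 hp').1 a hmem'
              omega
          rw [ih hp', pvDupMax_cons_not_mem hnm]

lemma B_eq (nums : List Int) : max_duplicate_alt nums = pvEnc (pvDupMax nums) := by
  unfold max_duplicate_alt
  rw [scan_eq _ (by simpa using PySem.List.sorted_pairwise_rev nums (fun x => x)),
      pvDupMax_perm (PySem.List.sorted_perm nums (fun x => x) true)]

-- ===== VERDICT =====
theorem max_duplicate_spec : Claim_equal_max_duplicate := by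
  intro nums _
  unfold Spec_max_duplicate
  rw [A_eq, B_eq]
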